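-- pv_equiv track=rewrite | github.com/DieterJoubert/Rosalind_solutions | stronghold/prob_kmer.py | get_kmer_composition
-- ===== SOURCE A (Python) =====
-- def get_kmer_composition(k, dna, kmers):
--     kmer_to_index = {kmers[i]: i for i in range(len(kmers))}
--     composition = [0] * len(kmers)
--
--     for i in range(len(dna)-k+1):
--         segment = dna[i:i+k]
--         index = kmer_to_index[segment]
--         composition[index] += 1
--
--     return composition
-- ===== SOURCE B (Python) =====
-- def get_kmer_composition(k, dna, kmers):
--     counts = {}
--     for i in range(len(dna) - k + 1):
--         seg = dna[i:i+k]
--         counts[seg] = counts.get(seg, 0) + 1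
--     return [counts.get(km, 0) for km in kmers]
-- ===== Notes on version B (the rewrite author's own statement) =====
-- stated objective: alternative
-- what changed: B counts all length-k windows into a dict in one pass and then gathers one count per kmer by name, instead of A's scatter-increment into a mutable list through a kmer->index dict; Pre_ excludes inputs where some window is missing from kmers (A raises KeyError) or is listed more than once (A's all-counts-on-the-last-duplicate result is an accident of dict-comprehension overwrite).
-- outside the precondition, e.g. on get_kmer_composition(1, 'AA', ['A', 'A']): A returns [0, 2], B returns [2, 2]
import Mathlib
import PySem

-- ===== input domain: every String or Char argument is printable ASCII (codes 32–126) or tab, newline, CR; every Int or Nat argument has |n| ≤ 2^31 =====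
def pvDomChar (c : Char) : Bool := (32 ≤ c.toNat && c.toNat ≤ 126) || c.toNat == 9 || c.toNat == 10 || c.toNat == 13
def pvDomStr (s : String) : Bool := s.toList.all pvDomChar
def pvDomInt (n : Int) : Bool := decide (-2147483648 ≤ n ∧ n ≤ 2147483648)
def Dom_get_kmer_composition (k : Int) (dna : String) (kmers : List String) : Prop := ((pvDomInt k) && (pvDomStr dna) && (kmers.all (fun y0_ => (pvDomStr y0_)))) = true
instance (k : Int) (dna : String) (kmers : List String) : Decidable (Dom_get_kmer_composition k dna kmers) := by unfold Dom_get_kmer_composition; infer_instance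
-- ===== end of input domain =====

-- B counts all length-k windows into a dict and then gathers one count per kmer by name,
-- instead of A's scatter-increment through a kmer->index dict (alternative decomposition, same cost).

-- ===== PORT A =====
def get_kmer_composition (k : Int) (dna : String) (kmers : List String) : List Int :=
  let kmer_to_index : PySem.Dict String Int :=
    (PySem.List.pyRange 0 (kmers.length : Int) 1).foldl
      (fun d i => d.insert (PySem.List.pyGetD kmers i "") i) PySem.Dict.empty
  let composition : List Int := PySem.List.pyRepeat [(0 : Int)] (kmers.length : Int)
  (PySem.List.pyRange 0 ((PySem.Str.len dna : Int) - k + 1) 1).foldl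
    (fun comp i =>
      let segment := PySem.Str.slice dna (some i) (some (i + k))
      match kmer_to_index.get? segment with
      | some index => PySem.List.pySetD comp index (PySem.List.pyGetD comp index 0 + 1)
      | none => comp)   -- Python raises KeyError here; excluded by Pre_
    composition

-- ===== PORT B =====
def get_kmer_composition_alt (k : Int) (dna : String) (kmers : List String) : List Int :=
  let counts : PySem.Dict String Int :=
    (PySem.List.pyRange 0 ((PySem.Str.len dna : Int) - k + 1) 1).foldl
      (fun d i =>
        let seg := PySem.Str.slice dna (some i) (some (i + k))
        d.insert seg (d.getD seg 0 + 1))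
      PySem.Dict.empty
  kmers.map (fun km => counts.getD km 0)

-- ===== PRECONDITION & SPEC =====
-- Pre_ requires every length-k window of dna to occur EXACTLY ONCE in kmers: a window absent from
-- kmers makes A raise KeyError, and a window listed twice hits A's accidental dict-comprehension
-- overwrite (all counts land on the last duplicate, zeroes elsewhere) — a defensible-corner artefact.
-- (When k + len(dna) <= 0 every window is the empty string, so the huge index range need not be enumerated.)
def Pre_get_kmer_composition (k : Int) (dna : String) (kmers : List String) : Prop :=
  if k + (PySem.Str.len dna : Int) ≤ 0 then kmers.count "" = 1
  else ∀ i ∈ PySem.List.pyRange 0 ((PySem.Str.len dna : Int) - k + 1) 1,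
    kmers.count (PySem.Str.slice dna (some i) (some (i + k))) = 1
instance (k : Int) (dna : String) (kmers : List String) : Decidable (Pre_get_kmer_composition k dna kmers) := by unfold Pre_get_kmer_composition; infer_instance
def pvWitness_get_kmer_composition : Int × String × List String := (1, "AB", ["A", "B"])

def Spec_get_kmer_composition (k : Int) (dna : String) (kmers : List String) (out : List Int) : Prop := out = get_kmer_composition_alt k dna kmers
instance (k : Int) (dna : String) (kmers : List String) (out : List Int) : Decidable (Spec_get_kmer_composition k dna kmers out) := by unfold Spec_get_kmer_composition; infer_instance

-- ===== CLAIM (what is proved, stated in full; the proofs are below) =====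
def Claim_equal_get_kmer_composition : Prop := ∀ (k : Int) (dna : String) (kmers : List String), Dom_get_kmer_composition k dna kmers → Pre_get_kmer_composition k dna kmers → Spec_get_kmer_composition k dna kmers (get_kmer_composition k dna kmers)

-- ===== LEMMAS AND PROOFS =====

-- A's loop body, abstracted over the dict lookup
def pvStepA (g : String → Option Int) (c : List Int) (w : String) : List Int :=
  match g w with
  | some idx => PySem.List.pySetD c idx (PySem.List.pyGetD c idx 0 + 1)
  | none => c

-- the kmer -> last index dict, built over the first n indices
def pvBuildIdx (kmers : List String) (n : Nat) : PySem.Dict String Int :=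
  (PySem.List.pyRange 0 (n : Int) 1).foldl
    (fun d i => d.insert (PySem.List.pyGetD kmers i "") i) PySem.Dict.empty

lemma pvBuildIdx_spec (kmers : List String) (n : Nat) :
    (∀ w i, (pvBuildIdx kmers n).get? w = some i →
      ∃ i' : Nat, i = (i' : Int) ∧ i' < n ∧ PySem.List.pyGetD kmers (i' : Int) "" = w)
    ∧ (∀ j : Nat, j < n →
      ∃ i : Nat, (pvBuildIdx kmers n).get? (PySem.List.pyGetD kmers (j : Int) "") = some (i : Int)
        ∧ i < n ∧ PySem.List.pyGetD kmers (i : Int) "" = PySem.List.pyGetD kmers (j : Int) "") := by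
  induction n with
  | zero =>
    constructor
    · intro w i h
      simp [pvBuildIdx, PySem.List.pyRange_one_eq_nil, PySem.Dict.get?_empty] at h
    · intro j hj; omega
  | succ n ih =>
    obtain ⟨ih1, ih2⟩ := ih
    have hbuild : pvBuildIdx kmers (n + 1)
        = (pvBuildIdx kmers n).insert (PySem.List.pyGetD kmers (n : Int) "") (n : Int) := by
      unfold pvBuildIdx
      rw [show ((n + 1 : Nat) : Int) = (n : Int) + 1 by push_cast; ring,
        PySem.List.pyRange_one_succ_right (by positivity), List.foldl_append]
      rfl
    constructor
    · intro w i h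
      rw [hbuild] at h
      by_cases hw : w = PySem.List.pyGetD kmers (n : Int) ""
      · subst hw
        rw [PySem.Dict.get?_insert_self] at h
        exact ⟨n, (Option.some.injEq _ _ ▸ h).symm ▸ rfl, by omega, rfl⟩
      · rw [PySem.Dict.get?_insert_of_ne _ _ hw] at h
        obtain ⟨i', hi', hlt, heq⟩ := ih1 w i h
        exact ⟨i', hi', by omega, heq⟩
    · intro j hj
      rw [hbuild]
      rcases Nat.lt_succ_iff_lt_or_eq.mp hj with hjn | rfl
      · by_cases hw : PySem.List.pyGetD kmers (j : Int) "" = PySem.List.pyGetD kmers (n : Int) ""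
        · refine ⟨n, ?_, by omega, hw.symm⟩
          rw [hw, PySem.Dict.get?_insert_self]
        · obtain ⟨i, hi, hlt, heq⟩ := ih2 j hjn
          exact ⟨i, by rw [PySem.Dict.get?_insert_of_ne _ _ hw]; exact hi, by omega, heq⟩
      · exact ⟨j, by rw [PySem.Dict.get?_insert_self], by omega, rfl⟩

lemma pvFoldA_length (g : String → Option Int) (ws : List String) :
    ∀ comp : List Int, (ws.foldl (pvStepA g) comp).length = comp.length := by
  induction ws with
  | nil => intro comp; rfl
  | cons w ws ih =>
    intro comp
    rw [List.foldl_cons, ih]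
    unfold pvStepA
    cases g w <;> simp [PySem.List.length_pySetD]

lemma pvFoldA_getD (g : String → Option Int) (ws : List String) :
    ∀ (comp : List Int) (j : Nat), j < comp.length →
    (∀ w ∈ ws, ∃ jw : Nat, g w = some (jw : Int) ∧ jw < comp.length) →
    (ws.foldl (pvStepA g) comp).getD j 0
      = comp.getD j 0 + ((ws.countP (fun w => g w == some (j : Int))) : Int) := by
  induction ws with
  | nil => intro comp j hj _; simp
  | cons w ws ih =>
    intro comp j hj h
    obtain ⟨jw, hgw, hjw⟩ := h w (List.mem_cons_self)
    have hstep : pvStepA g comp w = comp.set jw (comp.getD jw 0 + 1) := by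
      unfold pvStepA
      rw [hgw]
      simp [PySem.List.pySetD_natCast, PySem.List.pyGetD_natCast]
    rw [List.foldl_cons, hstep,
      ih (comp.set jw (comp.getD jw 0 + 1)) j (by simpa using hj)
        (fun w' hw' => by
          obtain ⟨j', h1, h2⟩ := h w' (List.mem_cons_of_mem _ hw')
          exact ⟨j', h1, by simpa using h2⟩)]
    rw [List.countP_cons]
    have hset : (comp.set jw (comp.getD jw 0 + 1)).getD j 0
        = if jw = j then comp.getD jw 0 + 1 else comp.getD j 0 := by
      rw [List.getD_eq_getElem _ _ (by simpa using hj), List.getElem_set]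
      split_ifs with hjj
      · subst hjj; rw [List.getD_eq_getElem _ _ hjw]
      · rw [List.getD_eq_getElem _ _ hj]
    rw [hset, hgw]
    by_cases hjj : jw = j
    · subst hjj
      simp
      omega
    · have : ¬ ((jw : Int) = (j : Int)) := by exact_mod_cast hjj
      simp [hjj, this]

-- for k + len(dna) <= 0 every Python window dna[i:i+k] (0 <= i) is the empty string
lemma pvSliceEmpty (dna : String) (i k : Int) (hi : 0 ≤ i)
    (hk : k + (dna.toList.length : Int) ≤ 0) :
    PySem.Str.slice dna (some i) (some (i + k)) = "" := by
  have hmono : PySem.List.clampIdx dna.toList.length (i + k)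
      ≤ PySem.List.clampIdx dna.toList.length i := by
    unfold PySem.List.clampIdx
    split_ifs <;> omega
  rw [← String.toList_inj]
  show _ = []
  rw [PySem.Str.toList_slice, PySem.Chars.slice_eq_listSlice]
  apply List.eq_nil_of_length_eq_zero
  rw [PySem.List.length_slice]
  omega

-- two distinct positions holding the same value force a count of at least 2
lemma pvTwoIdx (l : List String) (a : String) (i j : Nat) (hij : i < j) (hj : j < l.length)
    (ha : l[i]'(lt_trans hij hj) = a) (hb : l[j] = a) : 2 ≤ l.count a := by
  have hi : i < l.length := lt_trans hij hj
  have h1 : a ∈ l.take (i + 1) := by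
    have hlt : i < (l.take (i + 1)).length := by
      rw [List.length_take]; omega
    have : (l.take (i + 1))[i]'hlt = a := by
      rw [List.getElem_take]; exact ha
    exact this ▸ List.getElem_mem hlt
  have h2 : a ∈ l.drop (i + 1) := by
    have hlt : j - (i + 1) < (l.drop (i + 1)).length := by
      rw [List.length_drop]; omega
    have : (l.drop (i + 1))[j - (i + 1)]'hlt = a := by
      rw [List.getElem_drop]
      have : i + 1 + (j - (i + 1)) = j := by omega
      simp only [this]; exact hb
    exact this ▸ List.getElem_mem hlt
  have hc1 : 1 ≤ (l.take (i + 1)).count a := List.one_le_count_iff.mpr h1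
  have hc2 : 1 ≤ (l.drop (i + 1)).count a := List.one_le_count_iff.mpr h2
  calc 2 ≤ (l.take (i + 1)).count a + (l.drop (i + 1)).count a := by omega
    _ = l.count a := by rw [← List.count_append, List.take_append_drop]

-- a value occurring exactly once has a unique index
lemma pvUniqueIdx (l : List String) (i j : Nat) (hi : i < l.length) (hj : j < l.length)
    (hcount : l.count (l[j]) = 1) (heq : l[i] = l[j]) : i = j := by
  by_contra hne
  rcases Nat.lt_or_gt_of_ne hne with h | h
  · exact absurd (pvTwoIdx l (l[j]) i j h hj heq rfl) (by omega)
  · exact absurd (pvTwoIdx l (l[j]) j i h hi rfl heq) (by omega)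

-- the combinatorial core: A's increment loop vs B's per-kmer window count (kmers distinct)
lemma pvCore (kmers : List String) (ws : List String)
    (hws : ∀ w ∈ ws, kmers.count w = 1) :
    ws.foldl (pvStepA (pvBuildIdx kmers kmers.length).get?)
      (List.replicate kmers.length (0 : Int)) =
    kmers.map (fun km => ((ws.count km) : Int)) := by
  obtain ⟨hspec1, hspec2⟩ := pvBuildIdx_spec kmers kmers.length
  have hmem : ∀ w ∈ ws, w ∈ kmers := fun w hw =>
    List.count_pos_iff.mp (by rw [hws w hw]; omega)
  have hdom : ∀ w ∈ ws, ∃ jw : Nat,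
      (pvBuildIdx kmers kmers.length).get? w = some (jw : Int) ∧ jw < kmers.length := by
    intro w hw
    obtain ⟨j0, hj0, hj0eq⟩ := List.getElem_of_mem (hmem w hw)
    have hkey : PySem.List.pyGetD kmers (j0 : Int) "" = w := by
      rw [PySem.List.pyGetD_natCast, List.getD_eq_getElem _ _ hj0, hj0eq]
    obtain ⟨i, hget, hlt, _⟩ := hspec2 j0 hj0
    exact ⟨i, by rwa [hkey] at hget, hlt⟩
  apply List.ext_getElem
  · rw [pvFoldA_length, List.length_replicate, List.length_map]
  · intro j h1 h2
    have hjm : j < kmers.length := by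
      have := h1
      rwa [pvFoldA_length, List.length_replicate] at this
    rw [List.getElem_map]
    rw [← List.getD_eq_getElem _ 0 h1,
      pvFoldA_getD _ _ _ j (by simpa using hjm) (by simpa using hdom)]
    have hrep : (List.replicate kmers.length (0 : Int)).getD j 0 = 0 := by
      rw [List.getD_eq_getElem _ _ (by simpa using hjm)]
      simp
    rw [hrep, zero_add]
    have hkeyj : PySem.List.pyGetD kmers (j : Int) "" = kmers[j] := by
      rw [PySem.List.pyGetD_natCast, List.getD_eq_getElem _ _ hjm]
    have hcnt : ws.countP (fun w => (pvBuildIdx kmers kmers.length).get? w == some (j : Int))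
        = ws.count kmers[j] := by
      rw [List.count, List.countP_congr]
      intro w hw
      simp only [beq_iff_eq]
      constructor
      · intro hgw
        obtain ⟨i', hi', _, hkey⟩ := hspec1 w _ hgw
        have : i' = j := by exact_mod_cast hi'.symm
        subst this
        rw [← hkey, hkeyj]
      · intro hwk
        subst hwk
        obtain ⟨i, hget, hlt, heq⟩ := hspec2 j hjm
        have hkeyi : PySem.List.pyGetD kmers (i : Int) "" = kmers[i] := by
          rw [PySem.List.pyGetD_natCast, List.getD_eq_getElem _ _ hlt]
        have hcount1 : kmers.count (kmers[j]'hjm) = 1 :=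
          hws _ hw
        have hij : i = j := pvUniqueIdx kmers i j hlt hjm hcount1
          (by rw [← hkeyi, ← hkeyj, heq])
        subst hij
        rw [hkeyj] at hget
        exact hget
    rw [hcnt]

-- ===== VERDICT (by name: the statement is the Claim_ definition above) =====
theorem get_kmer_composition_spec : Claim_equal_get_kmer_composition := by
  intro k dna kmers _ hpre
  unfold Spec_get_kmer_composition
  have hA : get_kmer_composition k dna kmers
      = ((PySem.List.pyRange 0 ((PySem.Str.len dna : Int) - k + 1) 1).map
          (fun i => PySem.Str.slice dna (some i) (some (i + k)))).foldl
          (pvStepA (pvBuildIdx kmers kmers.length).get?)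
          (PySem.List.pyRepeat [(0 : Int)] (kmers.length : Int)) := by
    rw [List.foldl_map]
    rfl
  have hB : get_kmer_composition_alt k dna kmers
      = kmers.map (fun km =>
          (((PySem.List.pyRange 0 ((PySem.Str.len dna : Int) - k + 1) 1).map
            (fun i => PySem.Str.slice dna (some i) (some (i + k)))).count km : Int)) := by
    unfold get_kmer_composition_alt
    have hcounter : (PySem.List.pyRange 0 ((PySem.Str.len dna : Int) - k + 1) 1).foldl
        (fun (d : PySem.Dict String Int) i =>
          d.insert (PySem.Str.slice dna (some i) (some (i + k)))
            (d.getD (PySem.Str.slice dna (some i) (some (i + k))) 0 + 1))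
        PySem.Dict.empty
        = PySem.Dict.counter ((PySem.List.pyRange 0 ((PySem.Str.len dna : Int) - k + 1) 1).map
            (fun i => PySem.Str.slice dna (some i) (some (i + k)))) := by
      rw [← PySem.Dict.foldl_insert_getD_add_one_eq_counter, List.foldl_map]
    rw [hcounter]
    simp only [PySem.Dict.getD_counter]
  rw [hA, hB, PySem.List.pyRepeat_singleton, Int.toNat_natCast]
  apply pvCore
  intro w hw
  obtain ⟨i, hi, rfl⟩ := List.mem_map.mp hw
  unfold Pre_get_kmer_composition at hpre
  by_cases hcase : k + (PySem.Str.len dna : Int) ≤ 0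
  · rw [if_pos hcase] at hpre
    have h0i : 0 ≤ i := ((PySem.List.mem_pyRange_one).mp hi).1
    rw [pvSliceEmpty dna i k h0i (by simpa using hcase)]
    exact hpre
  · rw [if_neg hcase] at hpre
    exact hpre i hi
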